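-- pv_equiv track=rewrite | github.com/seenna1/percobaan | bruteforce_gui/wordlists/main.py | brute_force_generator
-- ===== SOURCE A (Python) =====
-- import itertools
-- import string
--
-- def brute_force_generator(password, max_length=4):
--     chars = string.ascii_lowercase
--     attempt = 0
--     for length in range(1, max_length + 1):
--         for guess in itertools.product(chars, repeat=length):
--             attempt += 1
--             guess_str = ''.join(guess)
--             yield attempt, guess_str
--             if guess_str == password:
--                 return
-- ===== SOURCE B (Python) =====
-- import string
--
-- def brute_force_generator(password, max_length=4):
--     chars = string.ascii_lowercase
--     # total number of guesses the enumeration would yield if nothing matched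
--     total = 0
--     for l in range(1, max_length + 1):
--         total += 26 ** l
--     # the stream of guesses is exactly the bijective base-26 numbering of 1,2,3,...;
--     # if password occurs in it (nonempty lowercase, short enough), stop at its rank
--     if 0 < len(password) <= max_length and all('a' <= c <= 'z' for c in password):
--         rank = 0
--         for c in password:
--             rank = rank * 26 + (ord(c) - 97) + 1
--         total = rank
--     for k in range(1, total + 1):
--         # bijective base-26 decode of k
--         j = k
--         s = ''
--         while j > 0:
--             j, d = divmod(j - 1, 26)
--             s = chars[d] + s
--         yield k, s
-- ===== Notes on version B (the rewrite author's own statement) =====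
-- stated objective: alternative
-- what changed: Replaces the nested per-length itertools.product loops with incremental attempt counter and early return by computing the stopping attempt count in closed form (the password's rank in the bijective base-26 numbering, when it is a matchable nonempty lowercase string short enough, else the total count) and then emitting the pairs in one flat loop that decodes each attempt number into its guess by repeated divmod.
import Mathlib
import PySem

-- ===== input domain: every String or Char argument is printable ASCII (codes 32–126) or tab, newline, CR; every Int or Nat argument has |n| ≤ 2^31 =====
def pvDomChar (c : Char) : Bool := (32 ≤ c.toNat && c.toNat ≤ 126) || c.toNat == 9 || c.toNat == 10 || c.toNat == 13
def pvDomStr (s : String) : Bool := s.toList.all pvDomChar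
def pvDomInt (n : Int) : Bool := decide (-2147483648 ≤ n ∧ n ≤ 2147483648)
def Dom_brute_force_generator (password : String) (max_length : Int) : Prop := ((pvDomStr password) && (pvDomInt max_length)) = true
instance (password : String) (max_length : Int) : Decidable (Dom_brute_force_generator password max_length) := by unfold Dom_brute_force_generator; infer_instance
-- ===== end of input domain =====

-- B replaces the nested per-length product loops of A by a closed-form stopping count
-- (the password's rank in the bijective base-26 numbering) and one flat loop decoding
-- each attempt number by repeated divmod; same yielded sequence (alternative structure).

-- ===== PORT A =====
-- string.ascii_lowercase (shared constant of both Pythons)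
def pvChars : List Char := "abcdefghijklmnopqrstuvwxyz".toList

-- itertools.product(chars, repeat=n), each tuple as a List Char, in product order
def pvProd : Nat → List (List Char)
  | 0 => [[]]
  | n + 1 => pvChars.flatMap (fun c => (pvProd n).map (fun t => c :: t))

-- inner loop of A over the guesses of one length: returns (attempt, yielded pairs, stopped?)
def pvInnerA (password : String) : List String → Int → Int × List (Int × String) × Bool
  | [], attempt => (attempt, [], false)
  | g :: gs, attempt =>
      let attempt' := attempt + 1
      if g == password then (attempt', [(attempt', g)], true)
      else
        let r := pvInnerA password gs attempt'
        (r.1, (attempt', g) :: r.2.1, r.2.2)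

-- outer loop of A over the lengths
def pvOuterA (password : String) : List Int → Int → List (Int × String)
  | [], _ => []
  | len :: rest, attempt =>
      let r := pvInnerA password ((pvProd len.toNat).map (fun t => String.ofList t)) attempt
      if r.2.2 then r.2.1 else r.2.1 ++ pvOuterA password rest r.1

def brute_force_generator (password : String) (max_length : Int) : List (Int × String) :=
  pvOuterA password (PySem.List.pyRange 1 (max_length + 1)) 0

-- ===== PORT B =====
-- B's innermost while loop: `while j > 0: j, d = divmod(j - 1, 26); s = chars[d] + s`
-- ((j-1) % 26 < 26, so chars[d] via getD is exact here)
def pvBijLoop (j : Nat) (s : List Char) : List Char :=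
  if j = 0 then s
  else pvBijLoop ((j - 1) / 26) (pvChars.getD ((j - 1) % 26) ' ' :: s)
termination_by j
decreasing_by exact Nat.lt_of_le_of_lt (Nat.div_le_self _ _) (by omega)

def brute_force_generator_alt (password : String) (max_length : Int) : List (Int × String) :=
  -- total = 0; for l in range(1, max_length+1): total += 26 ** l
  let total0 : Int := (PySem.List.pyRange 1 (max_length + 1)).foldl (fun t l => t + 26 ^ l.toNat) 0
  -- if 0 < len(password) <= max_length and all('a' <= c <= 'z' for c in password): total = rank
  let total : Int :=
    if 0 < (password.toList.length : Int) ∧ (password.toList.length : Int) ≤ max_length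
        ∧ password.toList.all (fun c => 97 ≤ c.toNat && c.toNat ≤ 122) then
      password.toList.foldl (fun r c => r * 26 + ((c.toNat : Int) - 97) + 1) 0
    else total0
  -- for k in range(1, total + 1): decode k, yield (k, s)
  (PySem.List.pyRange 1 (total + 1)).map (fun k => (k, String.ofList (pvBijLoop k.toNat [])))

-- ===== PRECONDITION & SPEC =====
def Spec_brute_force_generator (password : String) (max_length : Int) (out : List (Int × String)) : Prop := out = brute_force_generator_alt password max_length
instance (password : String) (max_length : Int) (out : List (Int × String)) : Decidable (Spec_brute_force_generator password max_length out) := by unfold Spec_brute_force_generator; infer_instance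

-- ===== CLAIM (what is proved, stated in full; the proofs are below) =====
def Claim_equal_brute_force_generator : Prop := ∀ (password : String) (max_length : Int), Dom_brute_force_generator password max_length → Spec_brute_force_generator password max_length (brute_force_generator password max_length)

-- ===== LEMMAS AND PROOFS =====

-- number of guesses of lengths 1..n  (pvOff (n+1) = 26 * (pvOff n + 1))
def pvOff : Nat → Nat
  | 0 => 0
  | n + 1 => 26 * (pvOff n + 1)

-- fixed-length base-26 decoding (proof-side normal form shared by both ports)
def pvDec : Nat → Nat → List Char
  | 0, _ => []
  | n + 1, j => pvDec n (j / 26) ++ [pvChars.getD (j % 26) ' ']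

-- most-significant-digit value of a lowercase word
def pvVal (cs : List Char) : Nat := cs.foldl (fun a c => a * 26 + (c.toNat - 97)) 0

def pvLower (cs : List Char) : Bool := cs.all (fun c => 97 ≤ c.toNat && c.toNat ≤ 122)

-- the segment of B's stream with attempt numbers a+1 .. b
def pvStreamSeg (a b : Nat) : List (Int × String) :=
  (List.range (b - a)).map (fun i => (((a + i : Nat) : Int) + 1, String.ofList (pvBijLoop (a + i + 1) [])))

-- enumeration of a guess list with attempt numbers a+1, a+2, …
def pvEnumFrom : Int → List String → List (Int × String)
  | _, [] => []
  | a, g :: gs => (a + 1, g) :: pvEnumFrom (a + 1) gs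

theorem pvOff_closed : ∀ n : Nat, 25 * pvOff n + 26 = 26 ^ (n + 1) := by
  intro n
  induction n with
  | zero => rfl
  | succ n ih =>
      show 25 * (26 * (pvOff n + 1)) + 26 = 26 ^ (n + 2)
      have h : 26 ^ (n + 2) = 26 * 26 ^ (n + 1) := by ring
      omega

theorem pvOff_succ_add (n : Nat) : pvOff (n + 1) = pvOff n + 26 ^ (n + 1) := by
  have h := pvOff_closed n
  show 26 * (pvOff n + 1) = _
  omega

theorem pvGetD_inj : ∀ d : Nat, d < 26 → ∀ e : Nat, e < 26 → pvChars.getD d ' ' = pvChars.getD e ' ' → d = e := by decide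

theorem pvGetD_lower : ∀ d : Nat, d < 26 → 97 ≤ (pvChars.getD d ' ').toNat ∧ (pvChars.getD d ' ').toNat ≤ 122 := by decide

theorem pvGetD_toNat : ∀ d : Nat, d < 26 → (pvChars.getD d ' ').toNat = 97 + d := by decide

theorem pvLength_pvDec (n : Nat) : ∀ j, (pvDec n j).length = n := by
  induction n with
  | zero => intro j; rfl
  | succ n ih => intro j; simp [pvDec, ih]

theorem pvDec_lower (n : Nat) : ∀ j, pvLower (pvDec n j) = true := by
  induction n with
  | zero => intro j; rfl
  | succ n ih =>
      intro j
      have h := pvGetD_lower (j % 26) (Nat.mod_lt _ (by norm_num))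
      simp [pvDec, pvLower] at ih ⊢
      exact ⟨ih (j / 26), h.1, h.2⟩

theorem pvChar_toNat_inj (a b : Char) (h : a.toNat = b.toNat) : a = b := by
  rw [← Char.ofNat_toNat a, ← Char.ofNat_toNat b, h]

theorem pvDec_inj (n : Nat) : ∀ i j, i < 26 ^ n → j < 26 ^ n → pvDec n i = pvDec n j → i = j := by
  induction n with
  | zero => intro i j hi hj _; omega
  | succ n ih =>
      intro i j hi hj h
      simp only [pvDec] at h
      rw [← List.concat_eq_append, ← List.concat_eq_append, List.concat_inj] at h
      have h26 : 26 ^ (n + 1) = 26 ^ n * 26 := by ring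
      have hdiv : i / 26 = j / 26 := by
        apply ih <;> first
          | exact Nat.div_lt_of_lt_mul (by omega)
          | exact h.1
      have hmod : i % 26 = j % 26 :=
        pvGetD_inj _ (Nat.mod_lt _ (by norm_num)) _ (Nat.mod_lt _ (by norm_num)) h.2
      omega

theorem pvVal_append (cs : List Char) (c : Char) :
    pvVal (cs ++ [c]) = 26 * pvVal cs + (c.toNat - 97) := by
  simp [pvVal, List.foldl_append, Nat.mul_comm]

theorem pvVal_lt : ∀ cs : List Char, pvLower cs = true → pvVal cs < 26 ^ cs.length := by
  intro cs
  induction cs using List.reverseRecOn with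
  | nil => intro _; simp [pvVal]
  | append_singleton cs c ih =>
      intro h
      simp only [pvLower, List.all_append, List.all_cons, List.all_nil, Bool.and_true,
        Bool.and_eq_true, decide_eq_true_eq] at h
      have h1 := ih h.1
      rw [pvVal_append]
      have hlen : (cs ++ [c]).length = cs.length + 1 := by simp
      rw [hlen]
      have hd : c.toNat - 97 < 26 := by omega
      have hpow : 26 ^ (cs.length + 1) = 26 * 26 ^ cs.length := by ring
      omega

theorem pvLower_getD (c : Char) (h1 : 97 ≤ c.toNat) (h2 : c.toNat ≤ 122) :
    pvChars.getD (c.toNat - 97) ' ' = c := by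
  apply pvChar_toNat_inj
  rw [pvGetD_toNat _ (by omega)]
  omega

theorem pvDec_val : ∀ cs : List Char, pvLower cs = true → pvDec cs.length (pvVal cs) = cs := by
  intro cs
  induction cs using List.reverseRecOn with
  | nil => intro _; rfl
  | append_singleton cs c ih =>
      intro h
      simp only [pvLower, List.all_append, List.all_cons, List.all_nil, Bool.and_true,
        Bool.and_eq_true, decide_eq_true_eq] at h
      have hlow : pvLower cs = true := by
        simp only [pvLower, List.all_eq_true]
        intro x hx
        have := h.1
        simp only [List.all_eq_true] at this
        exact this x hx
      have hd : c.toNat - 97 < 26 := by have := h.2; omega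
      rw [pvVal_append]
      simp only [List.length_append, List.length_cons, List.length_nil, pvDec]
      have hdiv : (26 * pvVal cs + (c.toNat - 97)) / 26 = pvVal cs := by omega
      have hmod : (26 * pvVal cs + (c.toNat - 97)) % 26 = c.toNat - 97 := by omega
      rw [hdiv, hmod, ih hlow, pvLower_getD c h.2.1 h.2.2]

theorem pvBij_block (L : Nat) : ∀ r s, r < 26 ^ (L + 1) →
    pvBijLoop (pvOff L + r + 1) s = pvDec (L + 1) r ++ s := by
  induction L with
  | zero =>
      intro r s hr0
      have hr : r < 26 := by simpa using hr0
      show pvBijLoop (0 + r + 1) s = _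
      rw [pvBijLoop]
      simp only [Nat.zero_add, Nat.add_sub_cancel]
      rw [if_neg (by omega)]
      have h1 : r / 26 = 0 := by omega
      rw [h1, pvBijLoop, if_pos rfl]
      show _ = (pvDec 0 (r / 26) ++ [pvChars.getD (r % 26) ' ']) ++ s
      have hm : r % 26 = r := by omega
      rw [hm]
      rfl
  | succ L ih =>
      intro r s hr
      rw [pvBijLoop, if_neg (by omega)]
      have hoff : pvOff (L + 1) = 26 * (pvOff L + 1) := rfl
      have h1 : (pvOff (L + 1) + r + 1 - 1) / 26 = pvOff L + r / 26 + 1 := by omega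
      have h2 : (pvOff (L + 1) + r + 1 - 1) % 26 = r % 26 := by omega
      rw [h1, h2]
      have hrdiv : r / 26 < 26 ^ (L + 1) := by
        have : 26 ^ (L + 2) = 26 ^ (L + 1) * 26 := by ring
        exact Nat.div_lt_of_lt_mul (by omega)
      rw [ih (r / 26) _ hrdiv]
      show _ = (pvDec (L + 1) (r / 26) ++ [pvChars.getD (r % 26) ' ']) ++ s
      simp

theorem pvDec_succ (n j : Nat) :
    pvDec (n + 1) j = pvDec n (j / 26) ++ [pvChars.getD (j % 26) ' '] := rfl

theorem pvDec_head : ∀ (n j : Nat), j < 26 ^ (n + 1) →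
    pvDec (n + 1) j = pvChars.getD (j / 26 ^ n) ' ' :: pvDec n (j % 26 ^ n) := by
  intro n
  induction n with
  | zero =>
      intro j hj
      have hj' : j < 26 := by simpa using hj
      rw [pvDec_succ, Nat.mod_eq_of_lt hj']
      simp only [pow_zero, Nat.div_one, Nat.mod_one]
      rfl
  | succ n ih =>
      intro j hj
      have hdiv : j / 26 < 26 ^ (n + 1) := by
        rw [Nat.div_lt_iff_lt_mul (by norm_num : 0 < 26)]
        calc j < 26 ^ (n + 2) := hj
          _ = 26 ^ (n + 1) * 26 := by ring
      rw [pvDec_succ, ih (j / 26) hdiv, pvDec_succ]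
      have h1 : j / 26 / 26 ^ n = j / 26 ^ (n + 1) := by
        rw [Nat.div_div_eq_div_mul]
        congr 1
        ring
      have h2 : j / 26 % 26 ^ n = j % 26 ^ (n + 1) / 26 := by
        have := Nat.mod_mul_right_div_self j 26 (26 ^ n)
        rw [show (26 : Nat) * 26 ^ n = 26 ^ (n + 1) by ring] at this
        omega
      have h3 : j % 26 ^ (n + 1) % 26 = j % 26 := by
        apply Nat.mod_mod_of_dvd
        exact ⟨26 ^ n, by ring⟩
      rw [h1, h2, h3]
      simp

theorem pv_range_mul (b : Nat) : ∀ (c : Nat),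
    List.range (c * b) = (List.range c).flatMap (fun q => (List.range b).map (fun r => q * b + r)) := by
  intro c
  induction c with
  | zero => simp
  | succ c ih =>
      have : (c + 1) * b = c * b + b := by ring
      rw [this, List.range_add, ih, List.range_succ]
      simp

theorem pvChars_enum : pvChars = (List.range 26).map (fun q => pvChars.getD q ' ') := by decide

theorem pvProd_eq : ∀ (n : Nat), pvProd n = (List.range (26 ^ n)).map (pvDec n) := by
  intro n
  induction n with
  | zero => simp [pvProd, pvDec]
  | succ n ih =>
      have hrange : List.range (26 ^ (n + 1)) =
          (List.range 26).flatMap (fun q => (List.range (26 ^ n)).map (fun r => q * 26 ^ n + r)) := by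
        rw [← pv_range_mul (26 ^ n) 26]
        congr 1
        ring
      rw [pvProd, ih, hrange, List.map_flatMap]
      conv_lhs => rw [pvChars_enum]
      rw [List.flatMap_map]
      apply List.flatMap_congr
      intro q hq
      rw [List.map_map, List.map_map]
      apply List.map_congr_left
      intro r hr
      have hq' : q < 26 := List.mem_range.mp hq
      have hr' : r < 26 ^ n := List.mem_range.mp hr
      have hlt : q * 26 ^ n + r < 26 ^ (n + 1) := by
        have h26 : 26 ^ (n + 1) = 26 * 26 ^ n := by ring
        rw [h26]
        calc q * 26 ^ n + r < q * 26 ^ n + 26 ^ n := by omega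
          _ = (q + 1) * 26 ^ n := by ring
          _ ≤ 26 * 26 ^ n := by
              apply Nat.mul_le_mul_right
              omega
      have hpos : 0 < 26 ^ n := Nat.pow_pos (by norm_num : 0 < 26)
      have hd : (q * 26 ^ n + r) / 26 ^ n = q := by
        rw [add_comm, Nat.add_mul_div_right _ _ hpos, Nat.div_eq_of_lt hr']
        omega
      have hm : (q * 26 ^ n + r) % 26 ^ n = r := by
        rw [add_comm, Nat.add_mul_mod_self_right]
        exact Nat.mod_eq_of_lt hr'
      simp only [Function.comp]
      rw [pvDec_head n _ hlt, hd, hm]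

-- the guesses of one length, in order
def pvBlock (L : Nat) : List String := (List.range (26 ^ L)).map (fun r => String.ofList (pvDec L r))

theorem pvBlock_eq (L : Nat) : (pvProd L).map (fun t => String.ofList t) = pvBlock L := by
  rw [pvProd_eq, List.map_map]
  rfl

theorem pvMem_block_iff (pw : String) (L : Nat) :
    pw ∈ pvBlock L ↔ (pw.toList.length = L ∧ pvLower pw.toList = true) := by
  constructor
  · intro h
    simp only [pvBlock, List.mem_map, List.mem_range] at h
    obtain ⟨r, _, hr⟩ := h
    have ht : pw.toList = pvDec L r := by rw [← hr, String.toList_ofList]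
    exact ⟨by rw [ht, pvLength_pvDec], by rw [ht, pvDec_lower]⟩
  · rintro ⟨hlen, hlow⟩
    simp only [pvBlock, List.mem_map, List.mem_range]
    refine ⟨pvVal pw.toList, by rw [← hlen]; exact pvVal_lt _ hlow, ?_⟩
    rw [← hlen, pvDec_val _ hlow, String.ofList_toList]

theorem pvEnumFrom_append : ∀ (xs ys : List String) (a : Int),
    pvEnumFrom a (xs ++ ys) = pvEnumFrom a xs ++ pvEnumFrom (a + xs.length) ys := by
  intro xs
  induction xs with
  | nil => intro ys a; simp [pvEnumFrom]
  | cons x xs ih =>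
      intro ys a
      simp only [List.cons_append, pvEnumFrom, ih, List.length_cons]
      have : a + 1 + (xs.length : Int) = a + (xs.length + 1 : Nat) := by push_cast; ring
      rw [this]

theorem pvEnumFrom_map_range : ∀ (n : Nat) (f : Nat → String) (a : Int),
    pvEnumFrom a ((List.range n).map f) = (List.range n).map (fun i : Nat => (a + (i : Int) + 1, f i)) := by
  intro n
  induction n with
  | zero => intro f a; rfl
  | succ n ih =>
      intro f a
      rw [List.range_succ, List.map_append, List.map_append, pvEnumFrom_append, ih]
      simp [pvEnumFrom]

theorem pvInnerA_nomatch (pw : String) : ∀ (gs : List String) (a : Int),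
    (∀ g ∈ gs, g ≠ pw) →
    pvInnerA pw gs a = (a + gs.length, pvEnumFrom a gs, false) := by
  intro gs
  induction gs with
  | nil => intro a _; simp [pvInnerA, pvEnumFrom]
  | cons g gs ih =>
      intro a h
      have hg : (g == pw) = false := beq_false_of_ne (h g List.mem_cons_self)
      simp only [pvInnerA, hg, Bool.false_eq_true, if_false,
        ih (a + 1) (fun x hx => h x (List.mem_cons_of_mem _ hx)), pvEnumFrom, List.length_cons]
      refine Prod.ext (by push_cast; ring) rfl

theorem pvInnerA_match (pw : String) : ∀ (pre post : List String) (a : Int),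
    (∀ g ∈ pre, g ≠ pw) →
    pvInnerA pw (pre ++ pw :: post) a =
      (a + pre.length + 1, pvEnumFrom a (pre ++ [pw]), true) := by
  intro pre
  induction pre with
  | nil => intro post a _; simp [pvInnerA, pvEnumFrom]
  | cons g pre ih =>
      intro post a h
      have hg : (g == pw) = false := beq_false_of_ne (h g List.mem_cons_self)
      simp only [List.cons_append, pvInnerA, hg, Bool.false_eq_true, if_false,
        ih post (a + 1) (fun x hx => h x (List.mem_cons_of_mem _ hx)), pvEnumFrom, List.length_cons]
      refine Prod.ext (by push_cast; ring) rfl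

theorem pvStreamSeg_append (a b c : Nat) (hab : a ≤ b) (hbc : b ≤ c) :
    pvStreamSeg a b ++ pvStreamSeg b c = pvStreamSeg a c := by
  unfold pvStreamSeg
  have h : c - a = (b - a) + (c - b) := by omega
  rw [h, List.range_add, List.map_append, List.map_map]
  congr 1
  apply List.map_congr_left
  intro i hi
  simp only [Function.comp]
  have h1 : a + (b - a + i) = b + i := by omega
  rw [h1]

theorem pvSeg_dec (L k : Nat) (hk : k ≤ 26 ^ (L + 1)) :
    pvEnumFrom ((pvOff L : Nat) : Int) ((List.range k).map (fun r => String.ofList (pvDec (L + 1) r))) =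
      pvStreamSeg (pvOff L) (pvOff L + k) := by
  rw [pvEnumFrom_map_range]
  unfold pvStreamSeg
  rw [Nat.add_sub_cancel_left]
  apply List.map_congr_left
  intro i hi
  have hi' : i < 26 ^ (L + 1) := lt_of_lt_of_le (List.mem_range.mp hi) hk
  rw [pvBij_block L i _ hi', List.append_nil]
  refine Prod.ext ?_ rfl
  push_cast
  ring

-- the length list [L+1, …, L+n] as pvOuterA consumes it
def pvLensFrom (L n : Nat) : List Int := (List.range n).map (fun i => ((L + 1 + i : Nat) : Int))

theorem pvLensFrom_cons (L n : Nat) :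
    pvLensFrom L (n + 1) = ((L + 1 : Nat) : Int) :: pvLensFrom (L + 1) n := by
  unfold pvLensFrom
  rw [List.range_succ_eq_map, List.map_cons, List.map_map]
  refine congrArg₂ _ (by norm_num) (List.map_congr_left ?_)
  intro i _
  show ((L + 1 + (i + 1) : Nat) : Int) = ((L + 1 + 1 + i : Nat) : Int)
  congr 1
  omega

theorem pvOff_mono : ∀ {a b : Nat}, a ≤ b → pvOff a ≤ pvOff b := by
  intro a b h
  obtain ⟨k, rfl⟩ := Nat.exists_eq_add_of_le h
  clear h
  induction k with
  | zero => simp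
  | succ k ih =>
      have h2 := pvOff_succ_add (a + k)
      have h3 : a + (k + 1) = (a + k) + 1 := by omega
      rw [h3]
      exact le_trans ih (le_trans (Nat.le_add_right _ (26 ^ (a + k + 1))) (by rw [h2]))

theorem pvBlock_len (L : Nat) : (pvBlock L).length = 26 ^ L := by
  simp [pvBlock]

theorem pvEnum_block (L : Nat) :
    pvEnumFrom ((pvOff L : Nat) : Int) (pvBlock (L + 1)) = pvStreamSeg (pvOff L) (pvOff (L + 1)) := by
  unfold pvBlock
  rw [pvSeg_dec L _ (le_refl _), pvOff_succ_add]

theorem pvAtt_eq (L : Nat) :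
    ((pvOff L : Nat) : Int) + ((pvBlock (L + 1)).length : Int) = ((pvOff (L + 1) : Nat) : Int) := by
  rw [pvBlock_len, pvOff_succ_add]
  push_cast
  ring

theorem pvOuterA_full (pw : String) : ∀ (n L : Nat),
    (∀ i, i < n → ¬(pw.toList.length = L + 1 + i ∧ pvLower pw.toList = true)) →
    pvOuterA pw (pvLensFrom L n) ((pvOff L : Nat) : Int) = pvStreamSeg (pvOff L) (pvOff (L + n)) := by
  intro n
  induction n with
  | zero =>
      intro L _
      simp [pvLensFrom, pvOuterA, pvStreamSeg]
  | succ n ih =>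
      intro L h
      rw [pvLensFrom_cons]
      simp only [pvOuterA]
      rw [Int.toNat_natCast, pvBlock_eq]
      have hblock : ∀ g ∈ pvBlock (L + 1), g ≠ pw := by
        intro g hg heq
        subst heq
        rw [pvMem_block_iff] at hg
        exact h 0 (by omega) ⟨by have := hg.1; omega, hg.2⟩
      rw [pvInnerA_nomatch pw _ _ hblock]
      simp only [Bool.false_eq_true, if_false]
      rw [pvAtt_eq]
      rw [ih (L + 1) (fun i hi hx => (h (i + 1) (by omega)) ⟨by have := hx.1; omega, hx.2⟩)]
      rw [pvEnum_block]
      rw [pvStreamSeg_append _ _ _ (pvOff_mono (by omega)) (pvOff_mono (by omega))]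
      have harr : L + 1 + n = L + (n + 1) := by omega
      rw [harr]

theorem pvOuterA_match (pw : String) : ∀ (n L j : Nat), j < n →
    pw.toList.length = L + 1 + j → pvLower pw.toList = true →
    pvOuterA pw (pvLensFrom L n) ((pvOff L : Nat) : Int) =
      pvStreamSeg (pvOff L) (pvOff (L + j) + pvVal pw.toList + 1) := by
  intro n
  induction n with
  | zero => intro L j hj _ _; omega
  | succ n ih =>
      intro L j hj hlen hlow
      rw [pvLensFrom_cons]
      simp only [pvOuterA]
      rw [Int.toNat_natCast, pvBlock_eq]
      cases j with
      | zero =>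
          have hlenL : pw.toList.length = L + 1 := by omega
          have hVlt : pvVal pw.toList < 26 ^ (L + 1) := by
            rw [← hlenL]
            exact pvVal_lt _ hlow
          have hpw : String.ofList (pvDec (L + 1) (pvVal pw.toList)) = pw := by
            rw [← hlenL, pvDec_val _ hlow, String.ofList_toList]
          have hsplit : pvBlock (L + 1) =
              ((List.range (pvVal pw.toList)).map (fun r => String.ofList (pvDec (L + 1) r))) ++ pw ::
                ((List.range (26 ^ (L + 1) - (pvVal pw.toList + 1))).map
                  (fun i => String.ofList (pvDec (L + 1) (pvVal pw.toList + 1 + i)))) := by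
            unfold pvBlock
            have hsum : 26 ^ (L + 1) = (pvVal pw.toList + 1) + (26 ^ (L + 1) - (pvVal pw.toList + 1)) := by
              omega
            rw [hsum, List.range_add, List.map_append, List.map_map, List.range_succ,
              List.map_append]
            rw [show (List.map (fun r => String.ofList (pvDec (L + 1) r)) [pvVal pw.toList]) = [pw] from by
              simp [hpw]]
            simp [List.append_assoc, Function.comp]
          have hpre : ∀ g ∈ (List.range (pvVal pw.toList)).map
              (fun r => String.ofList (pvDec (L + 1) r)), g ≠ pw := by
            intro g hg heq
            simp only [List.mem_map, List.mem_range] at hg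
            obtain ⟨r, hr, hfr⟩ := hg
            have hteq : pvDec (L + 1) r = pvDec (L + 1) (pvVal pw.toList) := by
              have h2 : (String.ofList (pvDec (L + 1) r)).toList =
                  (String.ofList (pvDec (L + 1) (pvVal pw.toList))).toList := by
                rw [hfr, heq, hpw]
              simpa [String.toList_ofList] using h2
            have := pvDec_inj (L + 1) r (pvVal pw.toList) (lt_trans hr hVlt) hVlt hteq
            omega
          rw [hsplit, pvInnerA_match pw _ _ _ hpre]
          simp only [if_true]
          have hfull : (List.range (pvVal pw.toList)).map
                (fun r => String.ofList (pvDec (L + 1) r)) ++ [pw] =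
              (List.range (pvVal pw.toList + 1)).map (fun r => String.ofList (pvDec (L + 1) r)) := by
            rw [List.range_succ, List.map_append]
            simp [hpw]
          rw [hfull, pvSeg_dec L (pvVal pw.toList + 1) (by omega)]
          congr 1
      | succ j =>
          have hblock : ∀ g ∈ pvBlock (L + 1), g ≠ pw := by
            intro g hg heq
            subst heq
            rw [pvMem_block_iff] at hg
            have := hg.1
            omega
          rw [pvInnerA_nomatch pw _ _ hblock]
          simp only [Bool.false_eq_true, if_false]
          rw [pvAtt_eq]
          have hjn : j < n := by omega
          have hlen2 : pw.toList.length = (L + 1) + 1 + j := by omega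
          rw [ih (L + 1) j hjn hlen2 hlow]
          rw [pvEnum_block]
          have hle : pvOff (L + 1) ≤ pvOff (L + 1 + j) + pvVal pw.toList + 1 := by
            have := pvOff_mono (show L + 1 ≤ L + 1 + j by omega)
            omega
          rw [pvStreamSeg_append _ _ _ (pvOff_mono (by omega)) hle]
          have harr : L + 1 + j = L + (j + 1) := by omega
          rw [harr]

theorem pvPyRange_eq (m : Int) : PySem.List.pyRange 1 (m + 1) = pvLensFrom 0 m.toNat := by
  rw [PySem.List.pyRange_one]
  have h : m + 1 - 1 = m := by ring
  rw [h]
  unfold pvLensFrom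
  apply List.map_congr_left
  intro i _
  push_cast
  ring

theorem pvTotal0_eq (n : Nat) :
    (pvLensFrom 0 n).foldl (fun t l => t + (26 : Int) ^ l.toNat) 0 = ((pvOff n : Nat) : Int) := by
  induction n with
  | zero => rfl
  | succ n ih =>
      unfold pvLensFrom at ih ⊢
      rw [List.range_succ, List.map_append, List.foldl_append, ih]
      simp only [List.map_cons, List.map_nil, List.foldl_cons, List.foldl_nil]
      rw [Int.toNat_natCast, pvOff_succ_add]
      push_cast
      ring

theorem pvRank_eq : ∀ cs : List Char, cs ≠ [] → pvLower cs = true →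
    cs.foldl (fun r c => r * 26 + ((c.toNat : Int) - 97) + 1) 0 =
      ((pvOff (cs.length - 1) + pvVal cs + 1 : Nat) : Int) := by
  intro cs
  induction cs using List.reverseRecOn with
  | nil => intro h; exact absurd rfl h
  | append_singleton cs c ih =>
      intro _ hlow
      simp only [pvLower, List.all_append, List.all_cons, List.all_nil, Bool.and_true,
        Bool.and_eq_true, decide_eq_true_eq] at hlow
      have hc1 : 97 ≤ c.toNat := hlow.2.1
      have hc2 : c.toNat ≤ 122 := hlow.2.2
      rw [List.foldl_append, pvVal_append]
      simp only [List.foldl_cons, List.foldl_nil, List.length_append, List.length_cons,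
        List.length_nil]
      rcases List.eq_nil_or_concat cs with hnil | _
      · subst hnil
        simp [pvVal, pvOff]
        omega
      · have hne : cs ≠ [] := by
          rintro rfl
          simp_all
        have hlen : 1 ≤ cs.length := List.length_pos_iff.mpr hne
        rw [ih hne hlow.1]
        have hoff : pvOff cs.length = 26 * (pvOff (cs.length - 1) + 1) := by
          have : cs.length = (cs.length - 1) + 1 := by omega
          rw [this]
          rfl
        have harith : cs.length + 1 - 1 = cs.length := by omega
        rw [harith, hoff]
        push_cast [hc1]
        ring_nf

theorem pvBmap_eq (t : Int) (_ht : 0 ≤ t) :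
    (PySem.List.pyRange 1 (t + 1)).map (fun k => (k, String.ofList (pvBijLoop k.toNat []))) =
      pvStreamSeg 0 t.toNat := by
  rw [PySem.List.pyRange_one]
  have h : t + 1 - 1 = t := by ring
  rw [h, List.map_map]
  unfold pvStreamSeg
  rw [Nat.sub_zero]
  apply List.map_congr_left
  intro i _
  simp only [Function.comp]
  have h1 : (1 + (i : Int)).toNat = 0 + i + 1 := by omega
  rw [h1]
  refine Prod.ext ?_ rfl
  push_cast
  ring

theorem pvAlt_eq (pw : String) (m : Int) :
    brute_force_generator_alt pw m =
      if 0 < (pw.toList.length : Int) ∧ (pw.toList.length : Int) ≤ m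
          ∧ pw.toList.all (fun c => 97 ≤ c.toNat && c.toNat ≤ 122) then
        pvStreamSeg 0 (pvOff (pw.toList.length - 1) + pvVal pw.toList + 1)
      else pvStreamSeg 0 (pvOff m.toNat) := by
  show (PySem.List.pyRange 1 ((if 0 < (pw.toList.length : Int) ∧ (pw.toList.length : Int) ≤ m
          ∧ pw.toList.all (fun c => 97 ≤ c.toNat && c.toNat ≤ 122) then
        pw.toList.foldl (fun r c => r * 26 + ((c.toNat : Int) - 97) + 1) 0
      else (PySem.List.pyRange 1 (m + 1)).foldl (fun t l => t + (26 : Int) ^ l.toNat) 0) + 1)).map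
      (fun k => (k, String.ofList (pvBijLoop k.toNat []))) = _
  split_ifs with hc
  · have h1 : 1 ≤ pw.toList.length := by
      have := hc.1
      omega
    have hne : pw.toList ≠ [] := by
      rw [← List.length_pos_iff]
      omega
    rw [pvRank_eq _ hne hc.2.2]
    rw [pvBmap_eq _ (Int.natCast_nonneg _), Int.toNat_natCast]
  · rw [pvPyRange_eq m, pvTotal0_eq, pvBmap_eq _ (Int.natCast_nonneg _), Int.toNat_natCast]

theorem pvA_eq (pw : String) (m : Int) :
    brute_force_generator pw m =
      if 0 < (pw.toList.length : Int) ∧ (pw.toList.length : Int) ≤ m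
          ∧ pw.toList.all (fun c => 97 ≤ c.toNat && c.toNat ≤ 122) then
        pvStreamSeg 0 (pvOff (pw.toList.length - 1) + pvVal pw.toList + 1)
      else pvStreamSeg 0 (pvOff m.toNat) := by
  unfold brute_force_generator
  rw [pvPyRange_eq]
  split_ifs with hc
  · have hj : pw.toList.length - 1 < m.toNat := by
      have := hc.1
      have := hc.2.1
      omega
    have hlen : pw.toList.length = 0 + 1 + (pw.toList.length - 1) := by
      have := hc.1
      omega
    have hmatch := pvOuterA_match pw m.toNat 0 (pw.toList.length - 1) hj hlen hc.2.2
    rw [Nat.zero_add] at hmatch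
    exact hmatch
  · have hfull := pvOuterA_full pw m.toNat 0 (fun i hi hx => hc ⟨by have := hx.1; omega,
      by have := hx.1; omega, hx.2⟩)
    rw [Nat.zero_add] at hfull
    exact hfull

-- ===== VERDICT (by name: the statement is the Claim_ definition above) =====
theorem brute_force_generator_spec : Claim_equal_brute_force_generator := by
  intro pw m _
  unfold Spec_brute_force_generator
  rw [pvA_eq, pvAlt_eq]
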